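-- pv_equiv track=rewrite | github.com/Adarshsahoo1703/100days-code-challenge | Easy/Row with minimum number of 1's/row-with-minimum-number-of-1s.py | minRow
-- ===== SOURCE A (Python) =====
-- def minRow(n,m,a):
--     #code here
--     ans,count = 0,a[0].count(1)
--     for i in range(1,n):
--         k = a[i].count(1)
--         if k<count:
--             count=k
--             ans=i+1
--     return ans if ans!=0 else 1
-- ===== SOURCE B (Python) =====
-- def minRow(n, m, a):
--     # build-then-scan: full table of 1-counts, then locate the first minimum
--     counts = [a[0].count(1)] + [a[i].count(1) for i in range(1, n)]
--     return counts.index(min(counts)) + 1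
-- ===== Notes on version B (the rewrite author's own statement) =====
-- stated objective: simpler
-- what changed: Replaces A's fused running-minimum loop with special-cased ans=0 sentinel by a two-pass build-then-scan: build the count table, then return counts.index(min(counts)) + 1.
import Mathlib
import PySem

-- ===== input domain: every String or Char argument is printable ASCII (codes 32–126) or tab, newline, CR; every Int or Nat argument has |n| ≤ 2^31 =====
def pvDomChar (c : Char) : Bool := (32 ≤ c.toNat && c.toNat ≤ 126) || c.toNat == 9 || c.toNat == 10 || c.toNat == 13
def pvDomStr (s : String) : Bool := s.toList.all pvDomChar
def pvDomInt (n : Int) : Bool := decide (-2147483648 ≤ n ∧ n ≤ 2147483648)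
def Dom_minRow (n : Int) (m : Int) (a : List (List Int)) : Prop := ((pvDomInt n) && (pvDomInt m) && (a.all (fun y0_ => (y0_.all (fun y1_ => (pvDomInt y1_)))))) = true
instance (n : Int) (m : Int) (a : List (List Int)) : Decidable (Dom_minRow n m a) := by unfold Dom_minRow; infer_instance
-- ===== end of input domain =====

-- B replaces A's fused running-minimum loop (with its ans=0 sentinel) by a two-pass
-- build-then-scan (count table, then index of minimum); equal return value on Pre_.

-- ===== PORT A =====
def minRow (n : Int) (m : Int) (a : List (List Int)) : Int :=
  -- ans,count = 0, a[0].count(1); for i in range(1,n): …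
  let st := (PySem.List.pyRange 1 n 1).foldl
    (fun (st : Int × Int) i =>
      let k := PySem.List.count ((PySem.List.pyGet? a i).getD []) 1
      if k < st.2 then (i + 1, k) else st)
    (0, PySem.List.count ((PySem.List.pyGet? a 0).getD []) 1)
  if st.1 ≠ 0 then st.1 else 1

-- ===== PORT B =====
def minRow_alt (n : Int) (m : Int) (a : List (List Int)) : Int :=
  let counts : List Int := (PySem.List.count ((PySem.List.pyGet? a 0).getD []) 1 : Int) ::
    (PySem.List.pyRange 1 n 1).map
      (fun i => (PySem.List.count ((PySem.List.pyGet? a i).getD []) 1 : Int))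
  let mn := (PySem.List.min? counts (fun x => x)).getD 0
  ((PySem.List.index? counts mn).getD 0 : Int) + 1

-- ===== PRECONDITION & SPEC =====
-- Pre_ excludes exactly the inputs where Python A raises IndexError: a empty, or n > len(a).
def Pre_minRow (n : Int) (m : Int) (a : List (List Int)) : Prop :=
  a ≠ [] ∧ n ≤ (a.length : Int)
instance (n : Int) (m : Int) (a : List (List Int)) : Decidable (Pre_minRow n m a) := by
  unfold Pre_minRow; infer_instance
def pvWitness_minRow : Int × Int × List (List Int) := (3, 3, [[1,1,0],[0,1,0],[1,1,1]])

def Spec_minRow (n : Int) (m : Int) (a : List (List Int)) (out : Int) : Prop := out = minRow_alt n m a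
instance (n : Int) (m : Int) (a : List (List Int)) (out : Int) : Decidable (Spec_minRow n m a out) := by unfold Spec_minRow; infer_instance

-- ===== CLAIM (what is proved, stated in full; the proofs are below) =====
def Claim_equal_minRow : Prop := ∀ (n : Int) (m : Int) (a : List (List Int)), Dom_minRow n m a → Pre_minRow n m a → Spec_minRow n m a (minRow n m a)

-- ===== LEMMAS AND PROOFS =====

-- Loop invariant for A's fold, stated for an arbitrary count function c.
theorem minRow_loop_inv (c : Int → Int) (n : Int) (hn : 1 ≤ n) :
    (PySem.List.pyRange 1 n 1).foldl
      (fun (st : Int × Int) i => if c i < st.2 then (i + 1, c i) else st)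
      (0, c 0)
    = (let cs := c 0 :: (PySem.List.pyRange 1 n 1).map c
       let M := ((PySem.List.pyRange 1 n 1).map c).foldl min (c 0)
       let r : Nat := (PySem.List.index? cs M).getD 0
       (if r = 0 then (0 : Int) else (r : Int) + 1, M)) := by
  induction n, hn using Int.le_induction with
  | base =>
      simp [PySem.List.pyRange_one_eq_nil (by omega : (1:Int) ≤ 1)]
  | succ n hn ih =>
      rw [PySem.List.pyRange_one_succ_right (by omega : (1:Int) ≤ n)]
      simp only [List.map_append, List.foldl_append, List.map_cons, List.map_nil,
        List.foldl_cons, List.foldl_nil, ih]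
      set rest := (PySem.List.pyRange 1 n 1).map c with hrest
      set M := rest.foldl min (c 0) with hM
      have hmin? : PySem.List.min? (c 0 :: rest) (fun x => x) = some M :=
        PySem.List.min?_id_cons (c 0) rest
      have hMmem : M ∈ c 0 :: rest := PySem.List.min?_mem hmin?
      have hMle : ∀ y ∈ c 0 :: rest, M ≤ y := by
        intro y hy; exact PySem.List.min?_isMin hmin? y hy
      have hlen : ((c 0 :: rest).length : Int) = n := by
        simp [hrest, PySem.List.length_pyRange_one]; omega
      by_cases hk : c n < M
      · -- new strict minimum at row n
        have hnot : c n ∉ c 0 :: rest := fun hmem => absurd (hMle _ hmem) (by omega)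
        have hidx : PySem.List.index? ((c 0 :: rest) ++ [c n]) (c n)
            = some (c 0 :: rest).length :=
          PySem.List.index?_append_singleton_self _ _ hnot
        have hmin : min M (c n) = c n := min_eq_right (le_of_lt hk)
        simp only [List.cons_append] at hidx
        simp only [hk, if_pos, hmin, hidx, Option.getD_some]
        have hlpos : (c 0 :: rest).length ≠ 0 := by simp
        rw [if_neg hlpos, hlen]
      · -- minimum unchanged
        have hmin : min M (c n) = M := min_eq_left (by omega)
        have hidx : PySem.List.index? ((c 0 :: rest) ++ [c n]) M
            = PySem.List.index? (c 0 :: rest) M :=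
          PySem.List.index?_append_of_mem _ hMmem
        simp only [List.cons_append] at hidx
        simp only [hk, if_neg, not_false_iff, hmin, hidx]

-- Generic bridge: A's whole body equals B's whole body, for any count function c.
theorem minRow_bridge (c : Int → Int) (n : Int) :
    (let st := (PySem.List.pyRange 1 n 1).foldl
        (fun (st : Int × Int) i => if c i < st.2 then (i + 1, c i) else st) (0, c 0)
     if st.1 ≠ 0 then st.1 else 1)
    = (let counts : List Int := c 0 :: (PySem.List.pyRange 1 n 1).map c
       let mn := (PySem.List.min? counts (fun x => x)).getD 0
       ((PySem.List.index? counts mn).getD 0 : Int) + 1) := by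
  by_cases hn : n ≤ 1
  · simp [PySem.List.pyRange_one_eq_nil hn, PySem.List.min?_id_cons]
  · rw [minRow_loop_inv c n (by omega)]
    simp only []
    set rest := (PySem.List.pyRange 1 n 1).map c with hrest
    set M := rest.foldl min (c 0) with hM
    rw [show (PySem.List.min? (c 0 :: rest) (fun x => x)) = some M from
      PySem.List.min?_id_cons (c 0) rest]
    simp only [Option.getD_some]
    set r : Nat := (PySem.List.index? (c 0 :: rest) M).getD 0 with hr
    by_cases h0 : r = 0
    · simp [h0]
    · have : ((r : Int) + 1) ≠ 0 := by omega
      simp [h0, this]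

theorem minRow_spec : Claim_equal_minRow := by
  intro n m a _ _
  unfold Spec_minRow minRow minRow_alt
  exact minRow_bridge (fun i => (PySem.List.count ((PySem.List.pyGet? a i).getD []) 1 : Int)) n
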